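-- pv_equiv track=rewrite | github.com/VimalMinsariya/euler-project | 100/103_Special_subset_sums.py | isOptimum
-- ===== SOURCE A (Python) =====
-- def isOptimum(S):
--     rank = len(S)
--     for i in range(1,(rank-1)//2):
--         if sum(S[:i+1]) <= sum(S[-i:]): return False
--     sumList = []
--     for i in range(1,2**rank):
--         mask = []
--         n = i
--         for k in range(rank):
--             n, r = divmod(n, 2)
--             mask += [r]
--         sublist = []
--         for k in range(rank):
--             v = S[k]*mask[k]
--             if v != 0: sublist.append(v)
--         sumList.append(sum(sublist))
--     if len(set(sumList)) == 2**rank-1: return True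
--     return False
-- ===== SOURCE B (Python) =====
-- def isOptimum(S):
--     n = len(S)
--     total = sum(S)
--     prefix = [0]
--     for x in S:
--         prefix.append(prefix[-1] + x)
--     for i in range(1, (n - 1) // 2):
--         if prefix[i + 1] <= total - prefix[n - i]:
--             return False
--     sums = [0]
--     for x in S:
--         sums = sums + [s + x for s in sums]
--     return len(set(sums[1:])) == 2 ** n - 1
-- ===== Notes on version B (the rewrite author's own statement) =====
-- stated objective: alternative
-- what changed: B builds all 2^n subset sums by incremental doubling of the sum list (one append-and-shift per element) instead of re-deriving the bit mask with divmod and re-summing a filtered sublist for each of the 2^n masks, and replaces the re-summed slices of the domination check by lookups in one precomputed prefix-sum list.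
import Mathlib
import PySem

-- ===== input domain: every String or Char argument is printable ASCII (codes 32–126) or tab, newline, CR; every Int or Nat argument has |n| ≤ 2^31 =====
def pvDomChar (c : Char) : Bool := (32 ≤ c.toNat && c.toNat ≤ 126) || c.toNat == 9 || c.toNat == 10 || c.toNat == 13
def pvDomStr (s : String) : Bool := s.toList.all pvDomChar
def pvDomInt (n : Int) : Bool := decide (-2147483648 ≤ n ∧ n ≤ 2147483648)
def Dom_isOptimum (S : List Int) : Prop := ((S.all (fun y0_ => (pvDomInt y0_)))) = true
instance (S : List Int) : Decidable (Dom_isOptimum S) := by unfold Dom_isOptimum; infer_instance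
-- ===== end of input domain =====

-- B replaces A's per-mask rebuild of every subset sum (divmod bit decomposition for each of the
-- 2^n masks) by an incremental doubling of the subset-sum list, and A's repeatedly re-summed
-- slices in the domination check by lookups in one precomputed prefix-sum list; objective: alternative.

-- ===== PORT A =====
def isOptimum (S : List Int) : Bool :=
  let rank : Nat := S.length
  if (PySem.List.pyRange 1 (PySem.Int.floordiv ((rank : Int) - 1) 2) 1).any (fun i =>
      decide ((PySem.List.slice S none (some (i + 1))).sum ≤ (PySem.List.slice S (some (-i)) none).sum))
  then false
  else
    let sumList : List Int :=
      (PySem.List.pyRange 1 ((2 : Int) ^ rank) 1).foldl (fun acc i =>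
        let mask : List Int :=
          ((PySem.List.pyRange 0 (rank : Int) 1).foldl
            (fun st _k => (PySem.Int.floordiv st.1 2, st.2 ++ [PySem.Int.mod st.1 2])) (i, ([] : List Int))).2
        let sublist : List Int :=
          (PySem.List.pyRange 0 (rank : Int) 1).foldl (fun sl k =>
            let v := PySem.List.pyGetD S k 0 * PySem.List.pyGetD mask k 0
            if v ≠ 0 then sl ++ [v] else sl) []
        acc ++ [sublist.sum]) []
    if ((PySem.Set.ofList sumList).length : Int) = (2 : Int) ^ rank - 1 then true else false

-- ===== PORT B =====
def isOptimum_alt (S : List Int) : Bool :=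
  let n : Nat := S.length
  let total : Int := S.sum
  let pre : List Int := S.foldl (fun p x => p ++ [PySem.List.pyGetD p (-1) 0 + x]) [0]
  if (PySem.List.pyRange 1 (PySem.Int.floordiv ((n : Int) - 1) 2) 1).any (fun i =>
      decide (PySem.List.pyGetD pre (i + 1) 0 ≤ total - PySem.List.pyGetD pre ((n : Int) - i) 0))
  then false
  else
    let sums : List Int := S.foldl (fun sums x => sums ++ sums.map (fun s => s + x)) [0]
    decide (((PySem.Set.ofList (PySem.List.slice sums (some 1) none)).length : Int) = (2 : Int) ^ n - 1)

-- ===== PRECONDITION & SPEC =====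
def Spec_isOptimum (S : List Int) (out : Bool) : Prop := out = isOptimum_alt S
instance (S : List Int) (out : Bool) : Decidable (Spec_isOptimum S out) := by unfold Spec_isOptimum; infer_instance

-- ===== CLAIM (what is proved, stated in full; the proofs are below) =====
def Claim_equal_isOptimum : Prop := ∀ (S : List Int), Dom_isOptimum S → Spec_isOptimum S (isOptimum S)

-- ===== LEMMAS AND PROOFS =====

def bitSum : List Int → Nat → Int
  | [], _ => 0
  | x :: t, m => (if m % 2 = 1 then x else 0) + bitSum t (m / 2)

def bitsOf : Int → Nat → List Int
  | _, 0 => []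
  | n, c + 1 => PySem.Int.mod n 2 :: bitsOf (PySem.Int.floordiv n 2) c

theorem maskFold_eq {α : Type} (l : List α) (n0 : Int) (acc : List Int) :
    (l.foldl (fun st _ => (PySem.Int.floordiv st.1 2, st.2 ++ [PySem.Int.mod st.1 2]))
      (n0, acc)).2 = acc ++ bitsOf n0 l.length := by
  induction l generalizing n0 acc with
  | nil => simp [bitsOf]
  | cons a t ih =>
    rw [List.foldl_cons]
    exact (ih _ _).trans (by simp [bitsOf])

theorem sum_filter_ne_zero {α : Type} (l : List α) (g : α → Int) :
    (((l.filter (fun k => !decide (g k = 0))).map g).sum) = ((l.map g).sum) := by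
  induction l with
  | nil => rfl
  | cons a t ih =>
    by_cases h : g a = 0
    · simp [h, ih]
    · rw [List.filter_cons]
      simp [h, ih]

theorem bitSum_eq_sum_bits (S : List Int) (m : Nat) :
    (((List.range S.length).map
        (fun k => S.getD k 0 * (bitsOf (m : Int) S.length).getD k 0)).sum) = bitSum S m := by
  induction S generalizing m with
  | nil => simp [bitSum]
  | cons x t ih =>
    rw [List.length_cons, List.range_succ_eq_map]
    simp only [List.map_cons, List.map_map, List.sum_cons]
    have h2 : PySem.Int.floordiv (m : Int) 2 = ((m / 2 : Nat) : Int) :=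
      (PySem.Int.floordiv_natCast m 2)
    have hb : bitsOf (m : Int) (t.length + 1)
        = PySem.Int.mod (m : Int) 2 :: bitsOf ((m / 2 : Nat) : Int) t.length := by
      rw [bitsOf, h2]
    rw [hb]
    have : ((List.range t.length).map
        ((fun k => (x :: t).getD k 0 * (PySem.Int.mod (m : Int) 2 :: bitsOf ((m / 2 : Nat) : Int) t.length).getD k 0) ∘ Nat.succ)).sum
        = bitSum t (m / 2) := by
      rw [← ih (m / 2)]
      apply congrArg
      apply List.map_congr_left
      intro k _
      simp
    rw [bitSum]
    simp only [List.getD_cons_zero, this]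
    have hm : PySem.Int.mod (m : Int) 2 = ((m % 2 : Nat) : Int) := PySem.Int.mod_natCast m 2
    rcases Nat.mod_two_eq_zero_or_one m with h | h <;> rw [hm, h] <;> simp

theorem pvRangeTwoMul (n : Nat) :
    List.range (2 * n) = (List.range n).flatMap (fun q => [2 * q, 2 * q + 1]) := by
  induction n with
  | zero => rfl
  | succ n ih =>
    have h : 2 * (n + 1) = (2 * n + 1) + 1 := by omega
    rw [h, List.range_succ, List.range_succ, ih, List.range_succ]
    simp

theorem doubling_eq (l : List Int) (init : List Int) :
    l.foldl (fun sums x => sums ++ sums.map (fun s => s + x)) init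
      = (List.range (2 ^ l.length)).flatMap (fun m => init.map (fun z => z + bitSum l m)) := by
  induction l generalizing init with
  | nil => simp [bitSum]
  | cons x t ih =>
    rw [List.foldl_cons, ih]
    rw [List.length_cons, pow_succ, mul_comm, pvRangeTwoMul]
    rw [List.flatMap_assoc]
    apply List.flatMap_congr
    intro q _
    simp only [List.flatMap_cons, List.flatMap_nil, List.append_nil, List.map_append, List.map_map]
    have h0 : bitSum (x :: t) (2 * q) = bitSum t q := by
      rw [bitSum]; simp [Nat.mul_mod_right]
    have h1 : bitSum (x :: t) (2 * q + 1) = x + bitSum t q := by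
      rw [bitSum]
      have : (2 * q + 1) % 2 = 1 := by omega
      have h2 : (2 * q + 1) / 2 = q := by omega
      simp [this, h2]
    rw [h0, h1]
    congr 1
    apply List.map_congr_left
    intro z _
    simp only [Function.comp]
    ring

theorem perIndex (S : List Int) (m : Nat) :
    ((PySem.List.pyRange 0 (S.length : Int) 1).foldl (fun sl k =>
        let v := PySem.List.pyGetD S k 0 *
          PySem.List.pyGetD (((PySem.List.pyRange 0 (S.length : Int) 1).foldl
            (fun st _k => (PySem.Int.floordiv st.1 2, st.2 ++ [PySem.Int.mod st.1 2]))
            ((m : Int), ([] : List Int))).2) k 0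
        if v ≠ 0 then sl ++ [v] else sl) []).sum = bitSum S m := by
  have hlen : (PySem.List.pyRange 0 (S.length : Int) 1).length = S.length := by
    rw [PySem.List.length_pyRange_one]; omega
  rw [maskFold_eq, hlen]
  simp only [List.nil_append]
  rw [PySem.List.foldl_append_ite
    (p := fun k => PySem.List.pyGetD S k 0 * PySem.List.pyGetD (bitsOf (m : Int) S.length) k 0 ≠ 0)
    (f := fun k => PySem.List.pyGetD S k 0 * PySem.List.pyGetD (bitsOf (m : Int) S.length) k 0)]
  simp only [ne_eq, decide_not, List.nil_append]
  rw [sum_filter_ne_zero]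
  rw [PySem.List.pyRange_zero_nat, List.map_map]
  rw [← bitSum_eq_sum_bits S m]
  apply congrArg
  apply List.map_congr_left
  intro k _
  simp [PySem.List.pyGetD_natCast]

theorem sumLists_eq (S : List Int) :
    ((PySem.List.pyRange 1 ((2 : Int) ^ S.length) 1).foldl (fun acc i =>
        let mask : List Int :=
          ((PySem.List.pyRange 0 (S.length : Int) 1).foldl
            (fun st _k => (PySem.Int.floordiv st.1 2, st.2 ++ [PySem.Int.mod st.1 2])) (i, ([] : List Int))).2
        let sublist : List Int :=
          (PySem.List.pyRange 0 (S.length : Int) 1).foldl (fun sl k =>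
            let v := PySem.List.pyGetD S k 0 * PySem.List.pyGetD mask k 0
            if v ≠ 0 then sl ++ [v] else sl) []
        acc ++ [sublist.sum]) [])
    = PySem.List.slice (S.foldl (fun sums x => sums ++ sums.map (fun s => s + x)) [0]) (some 1) none := by
  have hone : 1 ≤ 2 ^ S.length := Nat.one_le_two_pow
  rw [PySem.List.foldl_append_singleton_eq_map]
  rw [doubling_eq, PySem.List.slice_from_one]
  have h2n : (List.range (2 ^ S.length)) = 0 :: (List.range (2 ^ S.length - 1)).map Nat.succ := by
    rcases Nat.exists_eq_add_of_le hone with ⟨c, hc⟩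
    rw [hc]
    simp [Nat.add_comm 1 c, List.range_succ_eq_map]
  rw [h2n]
  simp only [List.flatMap_cons, List.map_cons, List.map_nil, List.flatMap_map,
    List.singleton_append, List.tail_cons]
  have ht : (((2 : Int) ^ S.length) - 1).toNat = 2 ^ S.length - 1 := by
    have h : ((2 : Int) ^ S.length) = ((2 ^ S.length : Nat) : Int) := by push_cast; ring
    rw [h]; omega
  have hrange : PySem.List.pyRange 1 ((2 : Int) ^ S.length) 1
      = (List.range (2 ^ S.length - 1)).map (fun k : Nat => (1 : Int) + (k : Int)) := by
    rw [PySem.List.pyRange_one, ht]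
  rw [hrange]
  rw [List.map_map]
  simp only [List.nil_append]
  rw [← List.map_eq_flatMap]
  apply List.map_congr_left
  intro k _
  simp only [Function.comp]
  have hcast : (1 : Int) + (k : Int) = ((k + 1 : Nat) : Int) := by push_cast; ring
  rw [hcast]
  have := perIndex S (k + 1)
  simp only [Nat.succ_eq_add_one]
  rw [zero_add]
  exact this

theorem pre_fold_general (l : List Int) (p0 : List Int) (h : p0 ≠ []) :
    l.foldl (fun p x => p ++ [PySem.List.pyGetD p (-1) 0 + x]) p0
      = p0 ++ (List.range l.length).map (fun j => p0.getLast h + (l.take (j + 1)).sum) := by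
  induction l generalizing p0 with
  | nil => simp
  | cons x t ih =>
    rw [List.foldl_cons]
    rw [PySem.List.pyGetD_neg_one (h := h)]
    rw [ih (p0 ++ [p0.getLast h + x]) (by simp)]
    rw [List.length_cons, List.range_succ_eq_map]
    simp only [List.map_cons, List.map_map, List.append_assoc]
    congr 1
    rw [List.getLast_append_singleton]
    simp only [List.cons_append, List.nil_append]
    congr 1
    · simp
    · apply List.map_congr_left
      intro j _
      simp only [Function.comp]
      rw [List.take_succ_cons, List.sum_cons]
      ring

theorem prefix_eq (S : List Int) :
    S.foldl (fun p x => p ++ [PySem.List.pyGetD p (-1) 0 + x]) [0]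
      = (List.range (S.length + 1)).map (fun j => (S.take j).sum) := by
  rw [pre_fold_general S [0] (by simp), List.range_succ_eq_map]
  simp

theorem dom_any_eq (S : List Int) :
    (PySem.List.pyRange 1 (PySem.Int.floordiv ((S.length : Int) - 1) 2) 1).any (fun i =>
      decide ((PySem.List.slice S none (some (i + 1))).sum ≤ (PySem.List.slice S (some (-i)) none).sum))
    = (PySem.List.pyRange 1 (PySem.Int.floordiv ((S.length : Int) - 1) 2) 1).any (fun i =>
      decide (PySem.List.pyGetD (S.foldl (fun p x => p ++ [PySem.List.pyGetD p (-1) 0 + x]) [0]) (i + 1) 0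
        ≤ S.sum - PySem.List.pyGetD (S.foldl (fun p x => p ++ [PySem.List.pyGetD p (-1) 0 + x]) [0]) ((S.length : Int) - i) 0)) := by
  apply PySem.List.any_congr_mem
  intro i hi
  rw [PySem.List.mem_pyRange_one] at hi
  obtain ⟨h1, h2⟩ := hi
  have h3 : (i + 1) * 2 ≤ (S.length : Int) - 1 := by
    rw [← PySem.Int.le_floordiv_iff_mul_le (by omega)]
    omega
  -- name k := i.toNat
  obtain ⟨k, rfl⟩ : ∃ k : Nat, i = (k : Int) := ⟨i.toNat, by omega⟩
  have hk1 : 1 ≤ k := by omega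
  have hkn : 2 * k + 3 ≤ S.length := by omega
  rw [prefix_eq]
  -- A-side slices
  rw [PySem.List.slice_to S (b := (k : Int) + 1) (by omega)]
  rw [PySem.List.slice_from_neg_natCast S k (by omega)]
  -- B-side prefix lookups
  have hc1 : ((k : Int) + 1) = ((k + 1 : Nat) : Int) := by push_cast; ring
  have hc2 : ((S.length : Int) - (k : Int)) = ((S.length - k : Nat) : Int) := by
    have : k ≤ S.length := by omega
    omega
  rw [hc1, hc2, PySem.List.pyGetD_natCast, PySem.List.pyGetD_natCast]
  have hg1 : ((List.range (S.length + 1)).map (fun j => (S.take j).sum)).getD (k + 1) 0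
      = (S.take (k + 1)).sum := by
    rw [List.getD_eq_getElem?_getD, List.getElem?_map, List.getElem?_range (by omega)]
    rfl
  have hg2 : ((List.range (S.length + 1)).map (fun j => (S.take j).sum)).getD (S.length - k) 0
      = (S.take (S.length - k)).sum := by
    rw [List.getD_eq_getElem?_getD, List.getElem?_map, List.getElem?_range (by omega)]
    rfl
  rw [hg1, hg2]
  rw [Int.toNat_natCast]
  have hsplit : (S.take (S.length - k)).sum + (S.drop (S.length - k)).sum = S.sum := by
    conv_rhs => rw [← List.take_append_drop (S.length - k) S]
    rw [List.sum_append]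
  rw [decide_eq_decide]
  omega

-- ===== VERDICT (by name: the statement is the Claim_ definition above) =====
theorem isOptimum_spec : Claim_equal_isOptimum := by
  intro S _
  show isOptimum S = isOptimum_alt S
  unfold isOptimum isOptimum_alt
  simp only [dom_any_eq S, sumLists_eq S]
  by_cases h : (PySem.List.pyRange 1 (PySem.Int.floordiv ((S.length : Int) - 1) 2) 1).any (fun i =>
      decide (PySem.List.pyGetD (S.foldl (fun p x => p ++ [PySem.List.pyGetD p (-1) 0 + x]) [0]) (i + 1) 0
        ≤ S.sum - PySem.List.pyGetD (S.foldl (fun p x => p ++ [PySem.List.pyGetD p (-1) 0 + x]) [0]) ((S.length : Int) - i) 0)) = true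
  · simp only [h, if_true]
  · simp only [Bool.not_eq_true] at h
    simp only [h, Bool.false_eq_true, if_false]
    by_cases hc : ((PySem.Set.ofList (PySem.List.slice (S.foldl (fun sums x => sums ++ sums.map (fun s => s + x)) [0]) (some 1) none)).length : Int) = (2 : Int) ^ S.length - 1
    · simp [hc]
    · simp [hc]
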